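-- pv_equiv track=rewrite | github.com/ShuaiW/inf1340 | inf1340_ass2/papers.py | distinct_decision
-- ===== SOURCE A (Python) =====
-- def distinct_decision(decisions_list):
--     """
--     Outputs distinct immigration decision
--
--     :param decisions_list: a list of entries contain one to four of the
--         following strings: "Accept", "Reject", "Secondary", and "Quarantine"
--     :return: a list of strings each represents the unique decision for that
--         entry
--     """
--     output = []
--
--     for entry in decisions_list:
--         if "Quarantine" in entry:
--             output.append("Quarantine")
--         elif "Reject" in entry:
--             output.append("Reject")
--         elif "Secondary" in entry:
--             output.append("Secondary")
--         else:
--             output.append("Accept")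
--
--     return output
-- ===== SOURCE B (Python) =====
-- def distinct_decision(decisions_list):
--     rank = {"Accept": 0, "Secondary": 1, "Reject": 2, "Quarantine": 3}
--     names = ["Accept", "Secondary", "Reject", "Quarantine"]
--     output = []
--     for entry in decisions_list:
--         best = 0
--         for d in entry:
--             best = max(best, rank.get(d, 0))
--         output.append(names[best])
--     return output
-- ===== Notes on version B (the rewrite author's own statement) =====
-- stated objective: idiomatic
-- what changed: Replaces the four-way membership branch chain per entry by a single scan that keeps a running maximum severity rank (table-driven), then maps the rank back to its name.
import Mathlib
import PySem

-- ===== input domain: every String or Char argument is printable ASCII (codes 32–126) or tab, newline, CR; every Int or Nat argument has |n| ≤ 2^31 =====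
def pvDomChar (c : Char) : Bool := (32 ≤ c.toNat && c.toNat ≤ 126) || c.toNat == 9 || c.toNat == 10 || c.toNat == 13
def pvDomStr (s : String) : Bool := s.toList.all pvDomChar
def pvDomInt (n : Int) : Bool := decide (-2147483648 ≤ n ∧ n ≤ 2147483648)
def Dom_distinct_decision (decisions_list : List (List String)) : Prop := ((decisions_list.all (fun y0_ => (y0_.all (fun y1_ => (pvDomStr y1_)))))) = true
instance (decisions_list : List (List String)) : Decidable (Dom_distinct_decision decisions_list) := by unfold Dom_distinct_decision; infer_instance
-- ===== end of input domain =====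

-- B replaces A's per-entry four-way membership branch chain by a single scan keeping a
-- running maximum severity rank, mapped back to its name (idiomatic table-driven form).

-- ===== PORT A =====
def distinct_decision (decisions_list : List (List String)) : List String :=
  decisions_list.foldl (fun output entry =>
    output ++ [if entry.contains "Quarantine" then "Quarantine"
               else if entry.contains "Reject" then "Reject"
               else if entry.contains "Secondary" then "Secondary"
               else "Accept"]) []

-- ===== PORT B =====
def pvRank : PySem.Dict String Int :=
  PySem.Dict.ofList [("Accept", 0), ("Secondary", 1), ("Reject", 2), ("Quarantine", 3)]

def pvNames : List String := ["Accept", "Secondary", "Reject", "Quarantine"]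

def distinct_decision_alt (decisions_list : List (List String)) : List String :=
  decisions_list.foldl (fun output entry =>
    let best := entry.foldl (fun best d => max best (pvRank.getD d 0)) 0
    -- names[best]: best is always in [0, 3], so pyGet? is some; .getD "" only realises that
    output ++ [(PySem.List.pyGet? pvNames best).getD ""]) []

-- ===== PRECONDITION & SPEC =====
def Spec_distinct_decision (decisions_list : List (List String)) (out : List String) : Prop := out = distinct_decision_alt decisions_list
instance (decisions_list : List (List String)) (out : List String) : Decidable (Spec_distinct_decision decisions_list out) := by unfold Spec_distinct_decision; infer_instance

-- ===== CLAIM (what is proved, stated in full; the proofs are below) =====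
def Claim_equal_distinct_decision : Prop := ∀ (decisions_list : List (List String)), Dom_distinct_decision decisions_list → Spec_distinct_decision decisions_list (distinct_decision decisions_list)

-- ===== LEMMAS AND PROOFS =====

-- the severity of one entry, as A's branch chain reads it
def pvSev (entry : List String) : Int :=
  if entry.contains "Quarantine" then 3
  else if entry.contains "Reject" then 2
  else if entry.contains "Secondary" then 1
  else 0

theorem pvRank_getD (d : String) :
    pvRank.getD d 0 = (if d = "Quarantine" then 3 else if d = "Reject" then 2
                       else if d = "Secondary" then 1 else 0 : Int) := by
  have h : pvRank = PySem.Dict.mk [("Accept", 0), ("Secondary", 1), ("Reject", 2), ("Quarantine", 3)] := by decide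
  simp [h, PySem.Dict.getD, PySem.Dict.get?_mk_cons]
  by_cases ha : d = "Accept" <;> by_cases hs : d = "Secondary" <;>
    by_cases hr : d = "Reject" <;> by_cases hq : d = "Quarantine" <;>
    simp_all [eq_comm, PySem.Dict.get?]

theorem pvSev_nonneg (entry : List String) : 0 ≤ pvSev entry := by
  unfold pvSev; split_ifs <;> norm_num

theorem pvSev_cons (d : String) (l : List String) :
    pvSev (d :: l) = max (pvRank.getD d 0) (pvSev l) := by
  rw [pvRank_getD]
  unfold pvSev
  by_cases hq : d = "Quarantine" <;> by_cases hr : d = "Reject" <;>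
    by_cases hs : d = "Secondary" <;>
    simp_all [eq_comm] <;> split_ifs <;> decide

theorem pvFold_max (l : List String) (b : Int) (hb : 0 ≤ b) :
    l.foldl (fun best d => max best (pvRank.getD d 0)) b = max b (pvSev l) := by
  induction l generalizing b with
  | nil => simp [pvSev]; omega
  | cons d l ih =>
      simp only [List.foldl_cons, pvSev_cons]
      rw [ih _ (le_trans hb (le_max_left _ _))]
      omega

theorem pvEntry_eq (entry : List String) :
    (PySem.List.pyGet? pvNames (entry.foldl (fun best d => max best (pvRank.getD d 0)) 0)).getD ""
      = (if entry.contains "Quarantine" then "Quarantine"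
         else if entry.contains "Reject" then "Reject"
         else if entry.contains "Secondary" then "Secondary"
         else "Accept") := by
  rw [pvFold_max entry 0 le_rfl, max_eq_right (pvSev_nonneg entry)]
  unfold pvSev
  split_ifs <;> decide

theorem distinct_decision_eq_alt (l : List (List String)) :
    distinct_decision l = distinct_decision_alt l := by
  unfold distinct_decision distinct_decision_alt
  rw [PySem.List.foldl_append_singleton_eq_map, PySem.List.foldl_append_singleton_eq_map]
  simp only [List.nil_append]
  exact (List.map_congr_left fun entry _ => (pvEntry_eq entry).symm)

-- ===== VERDICT (by name: the statement is the Claim_ definition above) =====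
theorem distinct_decision_spec : Claim_equal_distinct_decision := by
  intro l _
  unfold Spec_distinct_decision
  exact distinct_decision_eq_alt l
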